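-- pv_equiv track=rewrite | github.com/jchddd/scripts | jworkflow/Jworkflow/utility.py | phase_name_convert
-- ===== SOURCE A (Python) =====
-- def phase_name_convert(expression, convert=True):
--     '''
--     Function that converts phase name to Markdown type.
--
--     Parameters:
--         - expression: str name that need to convert / str
--         - convert (bool): perform convertion. Default = True
--     Return:
--         - The new str after processing
--     Example:
--         - phase_name_convert('ZnO2+2') -> '$ZnO_{2}^{2+}$'
--     '''
--     if not convert:
--         return expression
--
--     result = ""
--     i = 0
--     while i < len(expression):
--         if expression[i].isalpha():
--             result += expression[i]
--             i += 1
--         elif expression[i].isdigit():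
--             start = i
--             while i < len(expression) and expression[i].isdigit():
--                 i += 1
--             number = expression[start:i]
--             result += f"_{{{number}}}"
--         elif expression[i] in "+-":
--             sign = expression[i]
--             i += 1
--             if i < len(expression) and expression[i].isdigit():
--                 start = i
--                 while i < len(expression) and expression[i].isdigit():
--                     i += 1
--                 number = expression[start:i]
--                 result += f"^{{{number}{sign}}}"
--             else:
--                 result += f"^{{{sign}}}"
--         else:
--             result += expression[i]
--             i += 1
--     return '$' + result + '$'
-- ===== SOURCE B (Python) =====
-- from itertools import groupby
--
-- def _category(ch):
--     if ch.isdigit():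
--         return 'd'
--     if ch in '+-':
--         return 's'
--     return 'p'  # alpha and any other char pass through verbatim
--
-- def phase_name_convert(expression, convert=True):
--     if not convert:
--         return expression
--     tokens = [(k, ''.join(g)) for k, g in groupby(expression, key=_category)]
--     out = []
--     i = 0
--     while i < len(tokens):
--         kind, chunk = tokens[i]
--         if kind == 'p':
--             out.append(chunk)
--         elif kind == 'd':
--             out.append(f"_{{{chunk}}}")
--         else:
--             for s in chunk[:-1]:
--                 out.append(f"^{{{s}}}")
--             last = chunk[-1]
--             if i + 1 < len(tokens) and tokens[i + 1][0] == 'd':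
--                 out.append(f"^{{{tokens[i + 1][1]}{last}}}")
--                 i += 1  # digit group consumed by the sign
--             else:
--                 out.append(f"^{{{last}}}")
--         i += 1
--     return '$' + ''.join(out) + '$'
-- ===== Notes on version B (the rewrite author's own statement) =====
-- stated objective: alternative
-- what changed: Replaces A's single index-driven while loop with nested digit-collecting inner whiles by a two-pass design: an itertools.groupby tokenizing pass over category runs (digit/sign/passthrough), then an emitting pass over the token list in which a sign group's last sign absorbs an immediately following digit group.
import Mathlib
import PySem

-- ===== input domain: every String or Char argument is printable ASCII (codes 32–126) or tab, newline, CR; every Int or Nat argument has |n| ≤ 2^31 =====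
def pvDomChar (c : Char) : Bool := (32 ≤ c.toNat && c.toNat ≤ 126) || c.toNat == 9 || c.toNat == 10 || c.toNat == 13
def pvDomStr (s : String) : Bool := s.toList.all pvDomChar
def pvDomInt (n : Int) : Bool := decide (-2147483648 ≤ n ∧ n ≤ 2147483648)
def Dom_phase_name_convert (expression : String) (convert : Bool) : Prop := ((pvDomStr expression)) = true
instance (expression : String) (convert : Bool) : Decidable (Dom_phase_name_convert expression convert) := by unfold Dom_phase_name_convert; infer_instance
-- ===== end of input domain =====

-- B replaces A's index-driven while loop (with nested digit-collecting whiles) by a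
-- groupby-style tokenizing pass followed by an emitting pass over the token list;
-- same return value, objective: alternative decomposition.

-- ===== PORT A =====
-- A's inner `while … isdigit()` loops: maximal leading digit run and the remainder.
def pvSpanDigits : List Char → List Char × List Char
  | [] => ([], [])
  | c :: rest =>
    if PySem.Chars.isdigit c then
      let p := pvSpanDigits rest
      (c :: p.1, p.2)
    else ([], c :: rest)

-- termination helper for pvLoopA (cited by its decreasing_by)
lemma pvSpanDigits_snd_length_le (l : List Char) : (pvSpanDigits l).2.length ≤ l.length := by
  induction l with
  | nil => simp [pvSpanDigits]
  | cons c rest ih =>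
    by_cases h : PySem.Chars.isdigit c <;> simp [pvSpanDigits, h] <;> omega

-- A's outer while loop over the running index, as recursion on the remaining characters.
def pvLoopA : List Char → List Char
  | [] => []
  | c :: rest =>
    if PySem.Chars.isalpha c then
      c :: pvLoopA rest
    else if PySem.Chars.isdigit c then
      let p := pvSpanDigits rest
      '_' :: '{' :: (c :: p.1) ++ '}' :: pvLoopA p.2
    else if c == '+' || c == '-' then
      match rest with
      | x :: r =>
        if PySem.Chars.isdigit x then
          let p := pvSpanDigits (x :: r)
          '^' :: '{' :: p.1 ++ c :: '}' :: pvLoopA p.2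
        else '^' :: '{' :: c :: '}' :: pvLoopA (x :: r)
      | [] => ['^', '{', c, '}']
    else c :: pvLoopA rest
termination_by l => l.length
decreasing_by
  · simp
  · have := pvSpanDigits_snd_length_le rest; simp; omega
  · have := pvSpanDigits_snd_length_le (x :: r); simp at this ⊢; omega
  · simp
  · simp

def phase_name_convert (expression : String) (convert : Bool) : String :=
  if !convert then expression
  else "$" ++ String.mk (pvLoopA expression.toList) ++ "$"

-- ===== PORT B =====
inductive PvCat
  | pass
  | digit
  | sign
deriving DecidableEq, Repr

-- B's _category
def pvCat (c : Char) : PvCat :=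
  if PySem.Chars.isdigit c then PvCat.digit
  else if c == '+' || c == '-' then PvCat.sign
  else PvCat.pass

-- itertools.groupby(expression, key=_category)
def pvGroup : List Char → List (PvCat × List Char)
  | [] => []
  | c :: rest =>
    (pvCat c, c :: rest.takeWhile (fun x => pvCat x == pvCat c)) ::
      pvGroup (rest.dropWhile (fun x => pvCat x == pvCat c))
termination_by l => l.length
decreasing_by
  have := List.length_dropWhile_le (fun x => pvCat x == pvCat c) rest
  simp at this ⊢; omega

-- B's second pass over the token list (Source B's `i += 1` skip of a consumed digit
-- group appears as the sign-then-digit pattern consuming two tokens).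
def pvEmit : List (PvCat × List Char) → List Char
  | [] => []
  | (PvCat.pass, g) :: ts => g ++ pvEmit ts
  | (PvCat.digit, g) :: ts => '_' :: '{' :: g ++ '}' :: pvEmit ts
  | (PvCat.sign, g) :: (PvCat.digit, d) :: ts =>
      (g.dropLast.flatMap fun s => ['^', '{', s, '}']) ++
        match g.getLast? with
        | some last => '^' :: '{' :: d ++ last :: '}' :: pvEmit ts
        | none => pvEmit ts   -- unreachable: groupby groups are nonempty
  | (PvCat.sign, g) :: ts =>
      (g.dropLast.flatMap fun s => ['^', '{', s, '}']) ++
        match g.getLast? with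
        | some last => '^' :: '{' :: last :: '}' :: pvEmit ts
        | none => pvEmit ts   -- unreachable: groupby groups are nonempty

def phase_name_convert_alt (expression : String) (convert : Bool) : String :=
  if !convert then expression
  else "$" ++ String.mk (pvEmit (pvGroup expression.toList)) ++ "$"

-- ===== PRECONDITION & SPEC =====
def Spec_phase_name_convert (expression : String) (convert : Bool) (out : String) : Prop := out = phase_name_convert_alt expression convert
instance (expression : String) (convert : Bool) (out : String) : Decidable (Spec_phase_name_convert expression convert out) := by unfold Spec_phase_name_convert; infer_instance

-- ===== CLAIM (what is proved, stated in full; the proofs are below) =====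
def Claim_equal_phase_name_convert : Prop := ∀ (expression : String) (convert : Bool), Dom_phase_name_convert expression convert → Spec_phase_name_convert expression convert (phase_name_convert expression convert)

-- ===== LEMMAS AND PROOFS =====
lemma pvSpanDigits_eq (l : List Char) :
    pvSpanDigits l = (l.takeWhile PySem.Chars.isdigit, l.dropWhile PySem.Chars.isdigit) := by
  induction l with
  | nil => rfl
  | cons c rest ih =>
    by_cases h : PySem.Chars.isdigit c <;> simp [pvSpanDigits, h, ih]

lemma pvAlpha_not_digit : ∀ c, PySem.Chars.isalpha c → PySem.Chars.isdigit c = false := by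
  intro c
  simp [PySem.Chars.isalpha, PySem.Chars.isdigit, PySem.Chars.isupper, PySem.Chars.islower,
        Char.le_def, UInt32.le_iff_toNat_le]
  omega

lemma pvAlpha_not_sign (c : Char) (h : PySem.Chars.isalpha c = true) : (c == '+' || c == '-') = false := by
  rcases Bool.eq_false_or_eq_true (c == '+' || c == '-') with hb | hb
  · have hc : c = '+' ∨ c = '-' := by simpa using hb
    rcases hc with rfl | rfl <;> exact absurd h (by decide)
  · exact hb

lemma pvCat_digit (c : Char) (h : PySem.Chars.isdigit c = true) : pvCat c = PvCat.digit := by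
  simp [pvCat, h]

lemma pvCat_sign (c : Char) (hd : PySem.Chars.isdigit c = false) (hs : (c == '+' || c == '-') = true) :
    pvCat c = PvCat.sign := by simp [pvCat, hd, hs]

lemma pvCat_pass (c : Char) (hd : PySem.Chars.isdigit c = false) (hs : (c == '+' || c == '-') = false) :
    pvCat c = PvCat.pass := by simp [pvCat, hd, hs]

lemma pvCat_alpha (c : Char) (h : PySem.Chars.isalpha c) : pvCat c = PvCat.pass :=
  pvCat_pass c (pvAlpha_not_digit c h) (pvAlpha_not_sign c h)

lemma pvCat_beq_digit (x : Char) : (pvCat x == PvCat.digit) = PySem.Chars.isdigit x := by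
  unfold pvCat; split_ifs <;> simp_all

-- a pass run: emitting the grouped list = the run verbatim, then the grouped remainder
lemma pvPass_prefix (l : List Char) :
    l.takeWhile (fun x => pvCat x == PvCat.pass) ++
      pvEmit (pvGroup (l.dropWhile (fun x => pvCat x == PvCat.pass))) = pvEmit (pvGroup l) := by
  cases l with
  | nil => rfl
  | cons x r =>
    by_cases h : pvCat x = PvCat.pass
    · simp [List.takeWhile_cons, List.dropWhile_cons, h, pvGroup, pvEmit]
    · have hb : (pvCat x == PvCat.pass) = false := by simp [h]
      simp [List.takeWhile_cons, List.dropWhile_cons, hb]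

-- peeling one sign off a sign group of size ≥ 2
lemma pvSign_peel (c : Char) (g : List Char) (hg : g ≠ []) (ts : List (PvCat × List Char)) :
    pvEmit ((PvCat.sign, c :: g) :: ts) = '^' :: '{' :: c :: '}' :: pvEmit ((PvCat.sign, g) :: ts) := by
  obtain ⟨y, g', rfl⟩ := List.exists_cons_of_ne_nil hg
  cases ts with
  | nil => simp [pvEmit]
  | cons t ts' =>
    obtain ⟨k, d⟩ := t
    cases k <;> simp [pvEmit]

theorem pvMain (l : List Char) : pvEmit (pvGroup l) = pvLoopA l := by
  induction l using pvLoopA.induct with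
  | case1 => simp [pvGroup, pvEmit, pvLoopA]
  | case2 c rest h ih =>
    rw [pvLoopA.eq_def]
    simp only [h, if_pos]
    rw [pvGroup, pvCat_alpha c h, pvEmit]
    rw [← ih, ← pvPass_prefix rest]
    simp
  | case3 c rest h1 h2 p ih =>
    have hp : p = pvSpanDigits rest := rfl
    rw [hp] at ih
    rw [pvLoopA.eq_def]
    simp only [h1, h2, if_neg, if_pos, not_false_iff]
    rw [pvGroup, pvCat_digit c h2]
    simp only [pvCat_beq_digit]
    rw [pvEmit]
    rw [pvSpanDigits_eq] at ih ⊢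
    simp [← ih]
  | case4 c h1 h2 h3 x r hx p ih =>
    have hp : p = pvSpanDigits (x :: r) := rfl
    rw [hp] at ih
    rw [pvLoopA.eq_def]
    simp only [h1, h2, h3, hx, if_neg, if_pos, not_false_iff]
    rw [pvGroup, pvCat_sign c (by simpa using h2) h3]
    have hxc : pvCat x = PvCat.digit := pvCat_digit x hx
    have hg : pvGroup (x :: r) = (PvCat.digit, x :: r.takeWhile (fun y => pvCat y == pvCat x)) ::
        pvGroup (r.dropWhile (fun y => pvCat y == pvCat x)) := by
      rw [pvGroup, hxc]
    rw [pvSpanDigits_eq] at ih ⊢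
    simp only [List.takeWhile_cons, List.dropWhile_cons, hxc] at hg ⊢
    simp only [show (PvCat.digit == PvCat.sign) = false from rfl, Bool.false_eq_true, if_false]
    simp only [List.takeWhile_cons, List.dropWhile_cons, hx, if_pos] at ih
    rw [hg]
    simp [pvEmit, hx, pvCat_beq_digit, ih]
  | case5 c h1 h2 h3 x r hx ih =>
    rw [pvLoopA.eq_def]
    simp only [h1, h2, h3, hx, if_neg, if_pos, not_false_iff]
    rw [pvGroup, pvCat_sign c (by simpa using h2) h3]
    rw [List.takeWhile_cons, List.dropWhile_cons]
    by_cases hs : (x == '+' || x == '-') = true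
    · have hxc : pvCat x = PvCat.sign := pvCat_sign x (by simpa using hx) hs
      simp only [hxc]
      rw [pvSign_peel c _ (by simp) _]
      rw [← ih, pvGroup, hxc]
      simp [pvEmit]
    · have hxc : pvCat x = PvCat.pass := pvCat_pass x (by simpa using hx) (by simpa using hs)
      have hg : pvGroup (x :: r) = (PvCat.pass, x :: r.takeWhile (fun y => pvCat y == pvCat x)) ::
          pvGroup (r.dropWhile (fun y => pvCat y == pvCat x)) := by
        rw [pvGroup, hxc]
      simp only [hxc] at hg ⊢
      simp only [show (PvCat.pass == PvCat.sign) = false from rfl, Bool.false_eq_true, if_false]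
      rw [← ih, hg]
      simp [pvEmit]
  | case6 c h1 h2 h3 =>
    rw [pvLoopA.eq_def]
    simp only [h1, h2, h3, if_neg, if_pos, not_false_iff]
    rw [pvGroup, pvCat_sign c (by simpa using h2) h3]
    simp [pvEmit, pvGroup]
  | case7 c rest h1 h2 h3 ih =>
    rw [pvLoopA.eq_def]
    simp only [h1, h2, h3, if_neg, not_false_iff]
    rw [pvGroup, pvCat_pass c (by simpa using h2) (by simpa using h3), pvEmit]
    rw [← ih, ← pvPass_prefix rest]
    simp

-- ===== VERDICT (by name: the statement is the Claim_ definition above) =====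
theorem phase_name_convert_spec : Claim_equal_phase_name_convert := by
  intro expression convert _
  unfold Spec_phase_name_convert phase_name_convert phase_name_convert_alt
  cases convert with
  | false => rfl
  | true => simp [pvMain]
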